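-- pv_equiv track=rewrite | github.com/swaroop516/MyNotes | InterviewPreparation/InterviewQuestions/Syft/syft-dataeng-swaroop-pagonda.py | continuity_counter
-- ===== SOURCE A (Python) =====
-- def continuity_counter(flag_list):
--     """
--     flag_list: list of valid and invalid flags for each worker
--     """
--     # list has recieved based on the dates worked in decsending order, so reversing it
--     flag_list = flag_list[::-1]
--     count = 1
--     for i in range(0, len(flag_list)):
--         if flag_list[i] == 1:
--             count = 0 # if valid flag is 1 then reset the counter to 0
--         else:
--             count = count + 1
--     return count
-- ===== SOURCE B (Python) =====
-- def continuity_counter(flag_list):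
--     for i, f in enumerate(flag_list):
--         if f == 1:
--             return i
--     return len(flag_list) + 1
-- ===== Notes on version B (the rewrite author's own statement) =====
-- stated objective: simpler
-- what changed: Replaces the reverse-then-accumulate loop with a single forward scan that returns the index of the first valid flag (early exit), falling through to len+1 when no flag is 1.
import Mathlib
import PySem

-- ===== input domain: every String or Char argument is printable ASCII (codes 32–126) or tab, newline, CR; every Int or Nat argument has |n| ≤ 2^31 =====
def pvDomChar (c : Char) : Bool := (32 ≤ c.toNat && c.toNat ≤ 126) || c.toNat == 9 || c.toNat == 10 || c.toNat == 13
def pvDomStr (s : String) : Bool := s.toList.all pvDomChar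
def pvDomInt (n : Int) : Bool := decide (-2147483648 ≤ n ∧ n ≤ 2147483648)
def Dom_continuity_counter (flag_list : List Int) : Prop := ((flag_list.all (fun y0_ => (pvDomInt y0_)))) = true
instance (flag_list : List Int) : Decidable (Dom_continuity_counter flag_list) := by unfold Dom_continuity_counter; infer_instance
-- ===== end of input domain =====

-- B replaces A's reverse + accumulator loop by a single forward scan returning the
-- index of the first valid flag (objective: simpler).

-- ===== PORT A =====
-- flag_list[::-1]; count = 1; for each element: 1 resets count to 0, else count+1
def continuity_counter (flag_list : List Int) : Int :=
  ((PySem.List.slice? flag_list none none (-1)).getD []).foldl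
    (fun count f => if f == 1 then 0 else count + 1) 1

-- ===== PORT B =====
-- forward scan with running index: first element equal to 1 → its index; else none
def ccGo (i : Int) : List Int → Option Int
  | [] => none
  | x :: xs => if x == 1 then some i else ccGo (i + 1) xs

def continuity_counter_alt (flag_list : List Int) : Int :=
  match ccGo 0 flag_list with
  | some i => i
  | none => (flag_list.length : Int) + 1

-- ===== PRECONDITION & SPEC =====
def Spec_continuity_counter (flag_list : List Int) (out : Int) : Prop := out = continuity_counter_alt flag_list
instance (flag_list : List Int) (out : Int) : Decidable (Spec_continuity_counter flag_list out) := by unfold Spec_continuity_counter; infer_instance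

-- ===== CLAIM (what is proved, stated in full; the proofs are below) =====
def Claim_equal_continuity_counter : Prop := ∀ (flag_list : List Int), Dom_continuity_counter flag_list → Spec_continuity_counter flag_list (continuity_counter flag_list)

-- ===== LEMMAS AND PROOFS =====

theorem ccGo_shift (xs : List Int) (i : Int) :
    ccGo i xs = (ccGo 0 xs).map (fun j => i + j) := by
  induction xs generalizing i with
  | nil => simp [ccGo]
  | cons x xs ih =>
    by_cases h : x == 1
    · simp [ccGo, h]
    · simp only [ccGo, h, Bool.false_eq_true, if_false]
      rw [ih (i + 1), show (0:Int) + 1 = 1 by ring, ih 1, Option.map_map]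
      cases ccGo 0 xs with
      | none => rfl
      | some j => simp

theorem slice_rev (xs : List Int) :
    (PySem.List.slice? xs none none (-1)).getD [] = xs.reverse := by
  rw [PySem.List.slice?_none_none_neg_one]; rfl

theorem cc_eq_alt (xs : List Int) :
    xs.reverse.foldl (fun count f => if f == 1 then 0 else count + 1) 1
      = continuity_counter_alt xs := by
  rw [List.foldl_reverse]
  induction xs with
  | nil => simp [continuity_counter_alt, ccGo]
  | cons x xs ih =>
    by_cases h : x == 1
    · simp only [List.foldr_cons, h, if_true, continuity_counter_alt, ccGo]
    · simp only [List.foldr_cons, h, Bool.false_eq_true, if_false]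
      rw [ih]
      simp only [continuity_counter_alt, ccGo, h, Bool.false_eq_true, if_false]
      rw [show (0:Int) + 1 = 1 by ring, ccGo_shift xs 1]
      cases hg : ccGo 0 xs with
      | none => simp only [Option.map_none, List.length_cons]; push_cast; ring
      | some j => simp only [Option.map_some]; ring

-- ===== VERDICT (by name: the statement is the Claim_ definition above) =====
theorem continuity_counter_spec : Claim_equal_continuity_counter := by
  intro l _
  show continuity_counter l = continuity_counter_alt l
  rw [continuity_counter, slice_rev, cc_eq_alt]
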